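-- pv_equiv track=rewrite | github.com/23himanshusingh/PYTHON | ks2.py | MinValue
-- ===== SOURCE A (Python) =====
-- def MinValue(N, X):
--     N = list(str(N))
--     ln = len(N)
--     position = ln + 1
--     if (N[0] == '-'):
--         for i in range(ln - 1, 0, -1):
--             if ((ord(N[i]) - ord('0')) < X):
--                 position = i
--
--     else:
--         for i in range(ln - 1, -1, -1):
--             if ((ord(N[i]) - ord('0')) > X):
--                 position=i
--     c = chr(X + ord('0'))
--     str1 = N.insert(position, c)
--     return ''.join(N)
-- ===== SOURCE B (Python) =====
-- def MinValue(N, X):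
--     s = str(N)
--     c = chr(X + ord('0'))
--     if s[0] == '-':
--         body = s[1:]
--         cands = [body[:i] + c + body[i:] for i in range(len(body) + 1)]
--         return '-' + max(cands)
--     cands = [s[:i] + c + s[i:] for i in range(len(s) + 1)]
--     return min(cands)
-- ===== Notes on version B (the rewrite author's own statement) =====
-- stated objective: alternative
-- what changed: A computes one insertion position by a greedy right-to-left index scan and inserts there; B generates every possible insertion of the character at each position (after the sign for negatives) and returns the lexicographically minimal candidate (maximal digit-part for negatives), which is the numerically smallest since all candidates have equal length.
import Mathlib
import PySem

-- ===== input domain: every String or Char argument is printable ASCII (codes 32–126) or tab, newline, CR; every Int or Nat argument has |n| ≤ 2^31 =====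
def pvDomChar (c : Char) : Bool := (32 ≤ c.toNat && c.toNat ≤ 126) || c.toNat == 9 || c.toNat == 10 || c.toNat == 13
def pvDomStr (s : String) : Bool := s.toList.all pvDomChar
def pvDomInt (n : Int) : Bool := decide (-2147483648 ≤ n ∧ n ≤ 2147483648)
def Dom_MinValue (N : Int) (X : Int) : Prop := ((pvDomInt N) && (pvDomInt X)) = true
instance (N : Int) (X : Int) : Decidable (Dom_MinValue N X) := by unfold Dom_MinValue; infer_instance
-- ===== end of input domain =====

-- B replaces A's greedy right-to-left position scan by generating all insertions of the digit
-- character and picking the numerically minimal candidate (lexicographic min; max of the digit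
-- part for negatives); an alternative algorithm of the same small cost, not claimed faster.


-- ===== PORT A =====
def MinValue (N : Int) (X : Int) : String :=
  -- N = list(str(N)); str(N) is never empty, so the N[0] and N[i] accesses are in range (pyGetD is exact here)
  let Nl := (PySem.Int.toStr N).toList
  let ln : Int := Nl.length
  let position : Int :=
    if PySem.List.pyGetD Nl 0 ' ' = '-' then
      (PySem.List.pyRange (ln - 1) 0 (-1)).foldl
        (fun pos i => if ((PySem.List.pyGetD Nl i ' ').toNat : Int) - 48 < X then i else pos) (ln + 1)
    else
      (PySem.List.pyRange (ln - 1) (-1) (-1)).foldl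
        (fun pos i => if ((PySem.List.pyGetD Nl i ' ').toNat : Int) - 48 > X then i else pos) (ln + 1)
  -- c = chr(X + ord('0')): exact on Pre_ (a valid, non-surrogate codepoint)
  let c := Char.ofNat (X + 48).toNat
  String.ofList (PySem.List.insert Nl position c)

-- ===== PORT B =====
def MinValue_alt (N : Int) (X : Int) : String :=
  -- strings handled as their char lists (mk once at the end); candidate i is s[:i] + c + s[i:]
  let s := PySem.Int.toChars N
  let c := Char.ofNat (X + 48).toNat   -- chr(X + ord('0')); exact on Pre_
  if PySem.List.pyGetD s 0 ' ' = '-' then   -- s[0] == '-' (s is never empty)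
    let body := PySem.List.slice s (some 1) none
    let cands := (PySem.List.pyRange 0 ((body.length : Int) + 1)).map
      (fun i => PySem.List.slice body none (some i) ++ c :: PySem.List.slice body (some i) none)
    String.ofList ('-' :: (PySem.List.max? cands (fun x => x)).getD [])
  else
    let cands := (PySem.List.pyRange 0 ((s.length : Int) + 1)).map
      (fun i => PySem.List.slice s none (some i) ++ c :: PySem.List.slice s (some i) none)
    String.ofList ((PySem.List.min? cands (fun x => x)).getD [])

-- ===== PRECONDITION & SPEC =====
-- Pre_ excludes X where chr(X + 48) raises ValueError (X < -48 or X + 48 > 0x10FFFF) and X where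
-- chr(X + 48) is a lone surrogate (0xD800 ≤ X+48 ≤ 0xDFFF): there A returns a string containing a
-- surrogate, which a Lean String cannot represent (B returns the very same string).
def Pre_MinValue (N : Int) (X : Int) : Prop :=
  -48 ≤ X ∧ X ≤ 1114063 ∧ ¬ (55248 ≤ X ∧ X ≤ 57295)
instance (N : Int) (X : Int) : Decidable (Pre_MinValue N X) := by unfold Pre_MinValue; infer_instance
def pvWitness_MinValue : Int × Int := (5, 3)
def Spec_MinValue (N : Int) (X : Int) (out : String) : Prop := out = MinValue_alt N X
instance (N : Int) (X : Int) (out : String) : Decidable (Spec_MinValue N X out) := by unfold Spec_MinValue; infer_instance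

-- ===== CLAIM (what is proved, stated in full; the proofs are below) =====
def Claim_equal_MinValue : Prop := ∀ (N : Int) (X : Int), Dom_MinValue N X → Pre_MinValue N X → Spec_MinValue N X (MinValue N X)

-- ===== LEMMAS AND PROOFS =====

-- all insertions of c into t, leftmost first (the recursive view of B's candidate list)
def pvInsertions (c : Char) : List Char → List (List Char)
  | [] => [[c]]
  | x :: xs => (c :: x :: xs) :: (pvInsertions c xs).map (x :: ·)

-- insert c before the first element greater than c (the minimal insertion)
def pvGreedyMin (c : Char) : List Char → List Char
  | [] => [c]
  | x :: xs => if c < x then c :: x :: xs else x :: pvGreedyMin c xs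

-- insert c before the first element smaller than c (the maximal insertion)
def pvGreedyMax (c : Char) : List Char → List Char
  | [] => [c]
  | x :: xs => if x < c then c :: x :: xs else x :: pvGreedyMax c xs

lemma pvGreedyMin_eq_findIdx (c : Char) (t : List Char) :
    pvGreedyMin c t =
      t.take (t.findIdx (fun x => decide (c < x))) ++ c :: t.drop (t.findIdx (fun x => decide (c < x))) := by
  induction t with
  | nil => rfl
  | cons x xs ih =>
    by_cases h : c < x <;> simp [pvGreedyMin, List.findIdx_cons, h, ih]

lemma pvGreedyMax_eq_findIdx (c : Char) (t : List Char) :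
    pvGreedyMax c t =
      t.take (t.findIdx (fun x => decide (x < c))) ++ c :: t.drop (t.findIdx (fun x => decide (x < c))) := by
  induction t with
  | nil => rfl
  | cons x xs ih =>
    by_cases h : x < c <;> simp [pvGreedyMax, List.findIdx_cons, h, ih]

lemma pvGreedyMin_mem (c : Char) (t : List Char) : pvGreedyMin c t ∈ pvInsertions c t := by
  induction t with
  | nil => simp [pvGreedyMin, pvInsertions]
  | cons x xs ih =>
    by_cases h : c < x
    · simp [pvGreedyMin, pvInsertions, h]
    · simp only [pvGreedyMin, pvInsertions, if_neg h]
      exact List.mem_cons_of_mem _ (List.mem_map_of_mem ih)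

lemma pvGreedyMax_mem (c : Char) (t : List Char) : pvGreedyMax c t ∈ pvInsertions c t := by
  induction t with
  | nil => simp [pvGreedyMax, pvInsertions]
  | cons x xs ih =>
    by_cases h : x < c
    · simp [pvGreedyMax, pvInsertions, h]
    · simp only [pvGreedyMax, pvInsertions, if_neg h]
      exact List.mem_cons_of_mem _ (List.mem_map_of_mem ih)

lemma pvConsLeCons (x : Char) {l l' : List Char} (h : l ≤ l') : x :: l ≤ x :: l' := by
  rcases lt_or_eq_of_le h with h | h
  · exact le_of_lt (List.Lex.cons h)
  · exact le_of_eq (by rw [h])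

lemma pvGreedyMin_isMin (c : Char) (t : List Char) :
    ∀ u ∈ pvInsertions c t, pvGreedyMin c t ≤ u := by
  induction t with
  | nil => intro u hu; simp [pvInsertions] at hu; simp [pvGreedyMin, hu]
  | cons x xs ih =>
    intro u hu
    simp only [pvInsertions, List.mem_cons, List.mem_map] at hu
    rcases hu with rfl | ⟨v, hv, rfl⟩
    · -- u = c :: x :: xs
      by_cases h : c < x
      · simp [pvGreedyMin, h]
      · rw [pvGreedyMin, if_neg h]
        rcases lt_or_eq_of_le (not_lt.mp h) with hxc | hxc
        · exact le_of_lt (List.Lex.rel hxc)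
        · -- x = c : tails are pvGreedyMin c xs ≤ c :: xs
          subst hxc
          exact pvConsLeCons x (ih (x :: xs) (by cases xs <;> simp [pvInsertions]))
    · -- u = x :: v with v an insertion into xs
      by_cases h : c < x
      · rw [pvGreedyMin, if_pos h]
        exact le_of_lt (List.Lex.rel h)
      · rw [pvGreedyMin, if_neg h]
        exact pvConsLeCons x (ih v hv)

lemma pvGreedyMax_isMax (c : Char) (t : List Char) :
    ∀ u ∈ pvInsertions c t, u ≤ pvGreedyMax c t := by
  induction t with
  | nil => intro u hu; simp [pvInsertions] at hu; simp [pvGreedyMax, hu]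
  | cons x xs ih =>
    intro u hu
    simp only [pvInsertions, List.mem_cons, List.mem_map] at hu
    rcases hu with rfl | ⟨v, hv, rfl⟩
    · by_cases h : x < c
      · simp [pvGreedyMax, h]
      · rw [pvGreedyMax, if_neg h]
        rcases lt_or_eq_of_le (not_lt.mp h) with hxc | hxc
        · exact le_of_lt (List.Lex.rel hxc)
        · subst hxc
          exact pvConsLeCons c (ih (c :: xs) (by cases xs <;> simp [pvInsertions]))
    · by_cases h : x < c
      · rw [pvGreedyMax, if_pos h]
        exact le_of_lt (List.Lex.rel h)
      · rw [pvGreedyMax, if_neg h]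
        exact pvConsLeCons x (ih v hv)

-- min?/max? return the (unique) extremal VALUE once one candidate dominates the whole list
lemma pvMinEq (l : List (List Char)) (a m : List Char)
    (hm : m ∈ a :: l) (hmin : ∀ y ∈ a :: l, m ≤ y) :
    PySem.List.min? (a :: l) (fun x => x) = some m := by
  have hle := PySem.List.foldl_min_le l a
  have hb : l.foldl min a ≤ m := by
    rcases List.mem_cons.mp hm with rfl | hm'
    · exact hle.1
    · exact hle.2 m hm'
  have hm2 : m ≤ l.foldl min a := by
    rcases PySem.List.foldl_min_mem l a with h | h
    · rw [h]; exact hmin a (by simp)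
    · exact hmin _ (List.mem_cons_of_mem _ h)
  have h := (PySem.List.min?_id_cons a l).trans (congrArg some (le_antisymm hb hm2))
  convert h using 2

lemma pvMaxEq (l : List (List Char)) (a m : List Char)
    (hm : m ∈ a :: l) (hmax : ∀ y ∈ a :: l, y ≤ m) :
    PySem.List.max? (a :: l) (fun x => x) = some m := by
  have hle := PySem.List.le_foldl_max l a
  have hb : m ≤ l.foldl max a := by
    rcases List.mem_cons.mp hm with rfl | hm'
    · exact hle.1
    · exact hle.2 m hm'
  have hm2 : l.foldl max a ≤ m := by
    rcases PySem.List.foldl_max_mem l a with h | h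
    · rw [h]; exact hmax a (by simp)
    · exact hmax _ (List.mem_cons_of_mem _ h)
  have h := (PySem.List.max?_id_cons a l).trans (congrArg some (le_antisymm hm2 hb))
  convert h using 2

-- B's candidate list IS pvInsertions
lemma pvCands_eq' (c : Char) (t : List Char) :
    (List.range (t.length + 1)).map (fun k => t.take k ++ c :: t.drop k) = pvInsertions c t := by
  induction t with
  | nil => simp [pvInsertions, List.range_succ]
  | cons x xs ih =>
    rw [List.length_cons, List.range_succ_eq_map, pvInsertions, ← ih]
    simp only [List.map_cons, List.map_map]
    refine congrArg₂ List.cons (by simp) ?_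
    refine List.map_congr_left fun k _ => ?_
    simp [Function.comp, List.take_succ_cons, List.drop_succ_cons]

lemma pvCands_eq (c : Char) (t : List Char) :
    (PySem.List.pyRange 0 ((t.length : Int) + 1)).map
      (fun i => PySem.List.slice t none (some i) ++ c :: PySem.List.slice t (some i) none)
    = pvInsertions c t := by
  have hcast : ((t.length : Int) + 1) = ((t.length + 1 : Nat) : Int) := by push_cast; ring
  rw [hcast, PySem.List.pyRange_zero_nat, List.map_map, ← pvCands_eq' c t]
  apply List.map_congr_left
  intro k _
  simp only [Function.comp_apply]
  rw [PySem.List.slice_to_natCast, PySem.List.slice_from_natCast]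

-- the index/enumerate bridge for A's scans
lemma pvRangeEnum (t : List Char) (a : Nat) :
    (PySem.List.pyRange (a : Int) ((t.length : Int))).map
      (fun j => ((j : Int), PySem.List.pyGetD t j ' '))
    = PySem.List.enumerate (t.drop a) (a : Int) := by
  apply List.ext_getElem
  · simp only [List.length_map, PySem.List.length_pyRange_one, PySem.List.length_enumerate,
      List.length_drop]
    omega
  · intro k h1 h2
    have hk : a + k < t.length := by
      simp only [List.length_map, PySem.List.length_pyRange_one] at h1; omega
    simp only [List.getElem_map]
    rw [PySem.List.getElem_pyRange_one, PySem.List.getElem_enumerate]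
    have hidx : ((a : Int) + (k : Int)).toNat = a + k := by omega
    rw [PySem.List.pyGetD_eq_getElem t ' ' (by omega) (by omega)]
    simp only [hidx, List.getElem_drop]

-- a right fold over enumerate keeping the last hit = first index satisfying p, else init
lemma pvFoldrEnum (p : Char → Bool) (u : List Char) : ∀ (s init : Int),
    (PySem.List.enumerate u s).foldr (fun ix pos => if p ix.2 = true then ix.1 else pos) init
    = if u.findIdx p < u.length then s + (u.findIdx p : Int) else init := by
  induction u with
  | nil => intro s init; simp [PySem.List.enumerate_nil]
  | cons x xs ih =>
    intro s init
    rw [PySem.List.enumerate_cons]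
    cases hpx : p x with
    | true => simp [hpx, List.findIdx_cons]
    | false =>
      simp only [List.foldr_cons, hpx, Bool.false_eq_true, if_false, ih (s + 1) init,
        List.findIdx_cons, cond_false, List.length_cons]
      by_cases h : List.findIdx p xs < xs.length
      · rw [if_pos h, if_pos (by omega)]
        push_cast; ring
      · rw [if_neg h, if_neg (by omega)]

-- A's downward scan, rewritten: position = a + first index in (t.drop a) hit by P, else unchanged
lemma pvScan (t : List Char) (P : Char → Prop) [DecidablePred P] (a : Nat) (init : Int) :
    (PySem.List.pyRange ((t.length : Int) - 1) ((a : Int) - 1) (-1)).foldl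
        (fun pos i => if P (PySem.List.pyGetD t i ' ') then i else pos) init
    = if (t.drop a).findIdx (fun x => decide (P x)) < (t.drop a).length
      then (a : Int) + ((t.drop a).findIdx (fun x => decide (P x)) : Int)
      else init := by
  rw [PySem.List.pyRange_neg_one_eq_reverse]
  rw [show ((a : Int) - 1 + 1) = (a : Int) by ring,
      show ((t.length : Int) - 1 + 1) = (t.length : Int) by ring]
  rw [List.foldl_reverse]
  have hshape : (fun (i : Int) (pos : Int) => if P (PySem.List.pyGetD t i ' ') then i else pos)
      = (fun i pos => (fun (ix : Int × Char) (pos : Int) => if decide (P ix.2) = true then ix.1 else pos)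
          ((fun j => ((j : Int), PySem.List.pyGetD t j ' ')) i) pos) := by
    funext i pos
    simp
  rw [hshape, ← List.foldr_map (f := fun j : Int => ((j : Int), PySem.List.pyGetD t j ' '))
      (g := fun (ix : Int × Char) (pos : Int) => if decide (P ix.2) = true then ix.1 else pos)]
  rw [pvRangeEnum t a]
  exact pvFoldrEnum (fun x => decide (P x)) (t.drop a) a init

-- list.insert at an index past the end appends (Python clamps, step-for-step from PySem.List.insert)
lemma pvInsertPast (t : List Char) (c : Char) (i : Int) (h : (t.length : Int) ≤ i) :
    PySem.List.insert t i c = t ++ [c] := by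
  have h0 : ¬ i < 0 := by omega
  have h1 : min i (t.length : Int) = (t.length : Int) := min_eq_right h
  simp [PySem.List.insert, PySem.List.sliceIndices, h0, h1]

-- the A side of each branch: scan + insert = take/drop at (a + findIdx of the dropped part)
lemma pvAside (t : List Char) (P : Char → Prop) [DecidablePred P] (a : Nat) (c : Char)
    (ha : a ≤ t.length) :
    PySem.List.insert t
      ((PySem.List.pyRange ((t.length : Int) - 1) ((a : Int) - 1) (-1)).foldl
        (fun pos i => if P (PySem.List.pyGetD t i ' ') then i else pos) ((t.length : Int) + 1)) c
    = t.take (a + (t.drop a).findIdx (fun x => decide (P x)))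
        ++ c :: t.drop (a + (t.drop a).findIdx (fun x => decide (P x))) := by
  rw [pvScan]
  set f := (t.drop a).findIdx (fun x => decide (P x)) with hf
  have hfle : f ≤ (t.drop a).length := List.findIdx_le_length
  by_cases h : f < (t.drop a).length
  · rw [if_pos h]
    rw [show (a : Int) + (f : Int) = ((a + f : Nat) : Int) by push_cast; ring]
    rw [PySem.List.insert_natCast t (a + f) c (by simp only [List.length_drop] at h; omega)]
  · rw [if_neg h]
    have hlen : a + f = t.length := by
      simp only [List.length_drop] at hfle h; omega
    rw [pvInsertPast t c _ (by omega), hlen]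
    simp

-- character-level reading of A's digit comparisons (c is chr(X + 48))
lemma pvCharGtIff (c x : Char) (X : Int) (hc : (c.toNat : Int) = X + 48) :
    (((x.toNat : Int) - 48 > X) ↔ c < x) := by
  rw [Char.lt_def, UInt32.lt_iff_toNat_lt]
  show _ ↔ c.toNat < x.toNat
  omega

lemma pvCharLtIff (c x : Char) (X : Int) (hc : (c.toNat : Int) = X + 48) :
    (((x.toNat : Int) - 48 < X) ↔ x < c) := by
  rw [Char.lt_def, UInt32.lt_iff_toNat_lt]
  show _ ↔ x.toNat < c.toNat
  omega

lemma pvValidChar (X : Int) (h1 : -48 ≤ X) (h2 : X ≤ 1114063) (h3 : ¬ (55248 ≤ X ∧ X ≤ 57295)) :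
    ((Char.ofNat (X + 48).toNat).toNat : Int) = X + 48 := by
  rw [Char.toNat_ofNat, if_pos (by unfold Nat.isValidChar; omega)]
  omega

-- the two branches, each fully generic in the char list t and the inserted char c
lemma pvBranchNonneg (t : List Char) (c : Char) (X : Int) (hc : (c.toNat : Int) = X + 48) :
    PySem.List.insert t
      ((PySem.List.pyRange ((t.length : Int) - 1) (-1) (-1)).foldl
        (fun pos i => if ((PySem.List.pyGetD t i ' ').toNat : Int) - 48 > X then i else pos)
        ((t.length : Int) + 1)) c
    = (PySem.List.min? ((PySem.List.pyRange 0 ((t.length : Int) + 1)).map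
        (fun i => PySem.List.slice t none (some i) ++ c :: PySem.List.slice t (some i) none))
        (fun x => x)).getD [] := by
  have hA := pvAside t (fun x => ((x.toNat : Int) - 48 > X)) 0 c (Nat.zero_le _)
  rw [show ((0 : Nat) : Int) - 1 = (-1 : Int) by ring] at hA
  rw [hA]
  rw [pvCands_eq]
  have hpred : (fun x => decide (((x.toNat : Int) - 48 > X))) = (fun x => decide (c < x)) := by
    funext x
    exact decide_eq_decide.mpr (pvCharGtIff c x X hc)
  rw [List.drop_zero, hpred, Nat.zero_add]
  rw [← pvGreedyMin_eq_findIdx]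
  obtain ⟨a, l, hl⟩ : ∃ a l, pvInsertions c t = a :: l := by
    cases t <;> exact ⟨_, _, rfl⟩
  rw [hl, pvMinEq l a (pvGreedyMin c t) (hl ▸ pvGreedyMin_mem c t)
      (fun y hy => pvGreedyMin_isMin c t y (hl ▸ hy))]
  rfl

lemma pvBranchNeg (u : List Char) (c : Char) (X : Int) (hc : (c.toNat : Int) = X + 48) :
    PySem.List.insert ('-' :: u)
      ((PySem.List.pyRange ((('-' :: u).length : Int) - 1) 0 (-1)).foldl
        (fun pos i => if ((PySem.List.pyGetD ('-' :: u) i ' ').toNat : Int) - 48 < X then i else pos)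
        ((('-' :: u).length : Int) + 1)) c
    = '-' :: (PySem.List.max? ((PySem.List.pyRange 0 ((u.length : Int) + 1)).map
        (fun i => PySem.List.slice u none (some i) ++ c :: PySem.List.slice u (some i) none))
        (fun x => x)).getD [] := by
  have hA := pvAside ('-' :: u) (fun x => ((x.toNat : Int) - 48 < X)) 1 c (by simp)
  rw [show ((1 : Nat) : Int) - 1 = (0 : Int) by ring] at hA
  rw [hA]
  rw [pvCands_eq]
  have hpred : (fun x => decide (((x.toNat : Int) - 48 < X))) = (fun x => decide (x < c)) := by
    funext x
    exact decide_eq_decide.mpr (pvCharLtIff c x X hc)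
  rw [List.drop_succ_cons, List.drop_zero, hpred]
  have htd : ∀ (f : Nat), ('-' :: u).take (1 + f) ++ c :: ('-' :: u).drop (1 + f)
      = '-' :: (u.take f ++ c :: u.drop f) := by
    intro f
    rw [Nat.add_comm 1 f]
    simp [List.take_succ_cons, List.drop_succ_cons]
  rw [htd, ← pvGreedyMax_eq_findIdx]
  obtain ⟨a, l, hl⟩ : ∃ a l, pvInsertions c u = a :: l := by
    cases u <;> exact ⟨_, _, rfl⟩
  rw [hl, pvMaxEq l a (pvGreedyMax c u) (hl ▸ pvGreedyMax_mem c u)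
      (fun y hy => pvGreedyMax_isMax c u y (hl ▸ hy))]
  rfl

-- ===== VERDICT (by name: the statement is the Claim_ definition above) =====
theorem MinValue_spec : Claim_equal_MinValue := by
  intro N X _hDom hPre
  obtain ⟨h1, h2, h3⟩ := hPre
  simp only [Spec_MinValue, MinValue, MinValue_alt, PySem.Int.toList_toStr]
  have hc : ((Char.ofNat (X + 48).toNat).toNat : Int) = X + 48 := pvValidChar X h1 h2 h3
  set t := PySem.Int.toChars N with ht
  set c := Char.ofNat (X + 48).toNat with hcdef
  by_cases hneg : PySem.List.pyGetD t 0 ' ' = '-'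
  · rw [if_pos hneg, if_pos hneg]
    obtain ⟨u, hu⟩ : ∃ u, t = '-' :: u := by
      rcases ht2 : t with _ | ⟨x, xs⟩
      · rw [ht2] at hneg
        simp [PySem.List.pyGetD, PySem.List.pyGet?, PySem.List.pyIdx?] at hneg
      · rw [ht2] at hneg
        simp [PySem.List.pyGetD, PySem.List.pyGet?, PySem.List.pyIdx?] at hneg
        exact ⟨xs, by rw [hneg]⟩
    rw [hu]
    rw [show PySem.List.slice ('-' :: u) (some 1) none = u from by
      rw [PySem.List.slice_from_one]; rfl]
    exact congrArg String.ofList (pvBranchNeg u c X hc)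
  · rw [if_neg hneg, if_neg hneg]
    exact congrArg String.ofList (pvBranchNonneg t c X hc)
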